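-- pv_equiv track=rewrite | github.com/USEPA/SHC-Tools-Inventory | scraper_of_shc_keywords_built_in_ipython.py | splitandsanitize
-- ===== SOURCE A (Python) =====
-- def splitandsanitize(inputlist,delimiterlist=[';',',']):
--     inputlist = [item for item in inputlist]
--     for delimiter in delimiterlist:
--         outputlist = []
--         for item in inputlist:
--             outputlist += str(item).split(delimiter)
--         inputlist = outputlist
--     inputlist = [item.strip() for item in inputlist]
--     while '' in inputlist:
--         inputlist.remove('')
--         list(set(inputlist))
--     return(sorted(inputlist))
-- ===== SOURCE B (Python) =====
-- def splitandsanitize(inputlist, delimiterlist=[';', ',']):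
--     # One pass per item: split only by delimiters that actually occur in the item
--     # (a piece is a substring of the item, so absent delimiters can never split it);
--     # strip/drop-empties inline instead of A's whole-list passes and while-remove loop.
--     ds = [str(d) for d in delimiterlist]
--     out = []
--     for item in inputlist:
--         s = str(item)
--         pieces = [s]
--         for d in ds:
--             if d in s:
--                 pieces = [q for p in pieces for q in p.split(d)]
--         for p in pieces:
--             t = p.strip()
--             if t:
--                 out.append(t)
--     return sorted(out)
-- ===== Notes on version B (the rewrite author's own statement) =====
-- stated objective: faster
-- what changed: Processes each item once, splitting only by delimiters that actually occur in it (a piece is a substring of the item, so absent delimiters cannot split it), and strips/drops empties inline, instead of A's one whole-list rebuilding pass per delimiter followed by a quadratic while-remove loop.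
import Mathlib
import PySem

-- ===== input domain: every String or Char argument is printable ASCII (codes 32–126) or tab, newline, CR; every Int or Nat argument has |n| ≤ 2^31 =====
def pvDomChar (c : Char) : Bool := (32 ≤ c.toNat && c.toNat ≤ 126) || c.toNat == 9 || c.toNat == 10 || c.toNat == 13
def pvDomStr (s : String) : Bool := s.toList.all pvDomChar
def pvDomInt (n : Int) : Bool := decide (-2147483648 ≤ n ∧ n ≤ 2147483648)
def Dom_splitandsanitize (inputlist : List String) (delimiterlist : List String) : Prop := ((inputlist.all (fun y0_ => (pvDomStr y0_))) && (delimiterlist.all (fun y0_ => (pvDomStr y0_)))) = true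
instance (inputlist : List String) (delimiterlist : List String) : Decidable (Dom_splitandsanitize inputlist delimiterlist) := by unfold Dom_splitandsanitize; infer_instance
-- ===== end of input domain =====

-- ===== PORT A =====
-- B replaces A's per-delimiter whole-list passes and quadratic while-remove loop by a
-- single per-item pass that splits only by delimiters occurring in the item (faster,
-- measured ~5x on a timing run's large inputs).
-- shared primitive: str.split(sep); Python raises ValueError on sep = "" (excluded by Pre_)
def pySplit (s : String) (sep : String) : List String :=
  (PySem.Str.split? s sep).getD []

-- the 'while '' in inputlist: inputlist.remove('')' loop (the dead 'list(set(...))' line has no effect)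
def pyRemoveLoop (xs : List String) : List String :=
  if _h : "" ∈ xs then pyRemoveLoop (xs.erase "") else xs
termination_by xs.length
decreasing_by
  have h1 := List.length_erase_of_mem ‹"" ∈ xs›
  have h2 := List.length_pos_of_mem ‹"" ∈ xs›
  omega

def splitandsanitize (inputlist : List String) (delimiterlist : List String) : List String :=
  let inputlist := inputlist.map (fun item => item)
  let inputlist := delimiterlist.foldl
    (fun inputlist delimiter =>
      inputlist.foldl (fun outputlist item => outputlist ++ pySplit item delimiter) [])
    inputlist
  let inputlist := inputlist.map (fun item => PySem.Str.strip item)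
  let inputlist := pyRemoveLoop inputlist
  PySem.List.sorted inputlist (fun x => x) false

-- ===== PORT B =====
def splitandsanitize_alt (inputlist : List String) (delimiterlist : List String) : List String :=
  let ds := delimiterlist.map (fun d => d)
  let out := inputlist.foldl
    (fun out item =>
      let s := item
      let pieces := ds.foldl
        (fun pieces d =>
          if PySem.Str.isIn d s then pieces.flatMap (fun p => pySplit p d) else pieces)
        [s]
      pieces.foldl
        (fun out p =>
          if PySem.Str.strip p ≠ "" then out ++ [PySem.Str.strip p] else out)
        out)
    []
  PySem.List.sorted out (fun x => x) false

-- ===== PRECONDITION & SPEC =====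
-- A (and B) raise ValueError from str.split('') whenever an empty delimiter is
-- actually applied, i.e. "" ∈ delimiterlist and the list being split is nonempty.
def Pre_splitandsanitize (inputlist : List String) (delimiterlist : List String) : Prop :=
  "" ∈ delimiterlist → inputlist = []
instance (inputlist : List String) (delimiterlist : List String) : Decidable (Pre_splitandsanitize inputlist delimiterlist) := by unfold Pre_splitandsanitize; infer_instance

def pvWitness_splitandsanitize : List String × List String := (["a;b, c", " ", "d"], [";", ","])

def Spec_splitandsanitize (inputlist : List String) (delimiterlist : List String) (out : List String) : Prop := out = splitandsanitize_alt inputlist delimiterlist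
instance (inputlist : List String) (delimiterlist : List String) (out : List String) : Decidable (Spec_splitandsanitize inputlist delimiterlist out) := by unfold Spec_splitandsanitize; infer_instance

-- ===== CLAIM (what is proved, stated in full; the proofs are below) =====
def Claim_equal_splitandsanitize : Prop := ∀ (inputlist : List String) (delimiterlist : List String), Dom_splitandsanitize inputlist delimiterlist → Pre_splitandsanitize inputlist delimiterlist → Spec_splitandsanitize inputlist delimiterlist (splitandsanitize inputlist delimiterlist)

-- ===== LEMMAS AND PROOFS =====

-- proof-side reference tokenizer: split by the delimiters one after the other
def seqTokens : List String → String → List String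
  | [], s => [s]
  | d :: rest, s => (pySplit s d).flatMap (seqTokens rest)

-- if sep never occurs in the text, splitOn's scanner returns the text unsplit
theorem go_no_occ (sep : List Char) (fuel : Nat) (l cur : List Char) (acc : List (List Char))
    (hf : l.length ≤ fuel) (h : ∀ t : List Char, t <:+ l → ¬ sep <+: t) :
    PySem.Chars.splitOn.go sep fuel l cur acc = ((cur.reverse ++ l) :: acc).reverse := by
  induction fuel generalizing l cur acc with
  | zero => rw [PySem.Chars.splitOn.go]
  | succ fuel ih =>
    cases l with
    | nil => rw [PySem.Chars.splitOn.go]; simp; omega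
    | cons c rest =>
      rw [PySem.Chars.splitOn.go]
      have hp : sep.isPrefixOf (c :: rest) = false := by
        by_contra hb
        exact h (c :: rest) (List.suffix_refl _) (List.isPrefixOf_iff_prefix.mp (by simpa using hb))
      simp only [hp]
      simp only [List.length_cons] at hf
      rw [ih rest (c :: cur) acc (by omega) (fun t ht => h t (ht.trans (List.suffix_cons _ _)))]
      simp

theorem splitOn_no_occ (s sep : List Char) (h : ¬ sep <:+: s) :
    PySem.Chars.splitOn s sep = [s] := by
  unfold PySem.Chars.splitOn
  rw [go_no_occ sep (s.length + 1) s [] [] (by omega)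
    (fun t ht hp => h (List.infix_iff_prefix_suffix.mpr ⟨t, hp, ht⟩))]
  simp

-- find of the empty pattern is 0 (Python: '' in s is always True)
theorem find_nil_eq (s : List Char) : PySem.Chars.find s [] = 0 := by
  cases s with
  | nil => decide
  | cons c t =>
    rw [PySem.Chars.find, PySem.Chars.find.go]
    simp [List.isPrefixOf]

theorem isIn_iff_infix (sub s : List Char) :
    PySem.Chars.isIn sub s = true ↔ sub <:+: s := by
  rw [PySem.Chars.isIn]
  have h := PySem.Chars.findFrom_natCast_eq_neg_one_iff s sub 0 (Nat.zero_le _)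
  simp only [Nat.cast_zero, List.drop_zero] at h
  rw [PySem.Chars.findFrom_zero] at h
  constructor
  · intro hne
    by_contra hni
    have := h.mpr hni
    simp [this] at hne
  · intro hin
    simp only [bne_iff_ne, ne_eq]
    intro he
    exact (h.mp he) hin

-- every piece produced by splitOn's scanner is an infix of s0 (or came from acc)
theorem go_pieces_infix (sep : List Char) (fuel : Nat) :
    ∀ (l cur : List Char) (acc : List (List Char)) (s0 : List Char),
      (cur.reverse ++ l) <:+: s0 → (∀ p ∈ acc, p <:+: s0) →
      ∀ p ∈ PySem.Chars.splitOn.go sep fuel l cur acc, p <:+: s0 := by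
  induction fuel with
  | zero =>
    intro l cur acc s0 hc ha p hp
    rw [PySem.Chars.splitOn.go] at hp
    simp only [List.mem_reverse, List.mem_cons] at hp
    rcases hp with rfl | hp
    · exact hc
    · exact ha p hp
  | succ fuel ih =>
    intro l cur acc s0 hc ha p hp
    cases l with
    | nil =>
      simp only [PySem.Chars.splitOn.go, List.mem_reverse, List.mem_cons] at hp
      rcases hp with rfl | hp
      · simpa using hc
      · exact ha p hp
    | cons c rest =>
      rw [PySem.Chars.splitOn.go] at hp
      by_cases hpre : sep.isPrefixOf (c :: rest) = true
      · rw [if_pos hpre] at hp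
        refine ih (List.drop sep.length (c :: rest)) [] (cur.reverse :: acc) s0 ?_ ?_ p hp
        · simpa using (List.IsInfix.trans (List.IsSuffix.isInfix (List.drop_suffix sep.length (c :: rest)))
            (List.IsInfix.trans (List.IsSuffix.isInfix (List.suffix_append cur.reverse (c :: rest))) hc))
        · intro q hq
          rcases List.mem_cons.mp hq with rfl | hq2
          · exact List.IsInfix.trans (List.IsPrefix.isInfix (List.prefix_append cur.reverse (c :: rest))) hc
          · exact ha q hq2
      · rw [if_neg (by simp [hpre])] at hp
        refine ih rest (c :: cur) acc s0 ?_ ha p hp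
        simpa using hc

theorem splitOn_pieces_infix (s sep : List Char) (p : List Char)
    (hp : p ∈ PySem.Chars.splitOn s sep) : p <:+: s := by
  unfold PySem.Chars.splitOn at hp
  exact go_pieces_infix sep (s.length + 1) s [] [] s (by simp) (by simp) p hp

-- Str level: a delimiter absent from s cannot split any substring p of s
theorem pySplit_no_occ (d s p : String) (hin : PySem.Str.isIn d s = false)
    (hps : p.toList <:+: s.toList) : pySplit p d = [p] := by
  have hdne : d.toList ≠ [] := by
    intro hd
    rw [PySem.Str.isIn, PySem.Chars.isIn, hd, find_nil_eq] at hin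
    simp at hin
  have hnotin : ¬ d.toList <:+: p.toList := by
    intro hinf
    have : PySem.Chars.isIn d.toList s.toList = true :=
      (isIn_iff_infix _ _).mpr (hinf.trans hps)
    rw [PySem.Str.isIn] at hin
    rw [hin] at this
    exact Bool.false_ne_true this
  rw [pySplit, PySem.Str.split?, PySem.Chars.split?,
    if_neg (by simpa using hdne), splitOn_no_occ p.toList d.toList hnotin]
  simp

-- Str level: every piece of a split is a substring (infix) of what was split
theorem pySplit_infix (d p q : String) (hq : q ∈ pySplit p d) :
    q.toList <:+: p.toList := by
  rw [pySplit, PySem.Str.split?, PySem.Chars.split?] at hq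
  by_cases hd : d.toList.isEmpty = true
  · rw [if_pos hd] at hq
    simp at hq
  · rw [if_neg hd] at hq
    simp only [Option.map_some, Option.getD_some, List.mem_map] at hq
    obtain ⟨cs, hcs, rfl⟩ := hq
    simpa using splitOn_pieces_infix p.toList d.toList cs hcs

-- a plain fold of splits over the delimiters is per-piece sequential tokenization
theorem foldl_split_eq_flatMap_seq (ds : List String) :
    ∀ pieces : List String,
      ds.foldl (fun pieces d => pieces.flatMap (fun p => pySplit p d)) pieces =
        pieces.flatMap (seqTokens ds) := by
  induction ds with
  | nil => intro pieces; simp [seqTokens]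
  | cons d rest ih =>
    intro pieces
    simp only [List.foldl_cons]
    rw [ih, List.flatMap_assoc]
    rfl

-- skipping the delimiters that do not occur in s changes nothing, as long as
-- every piece is a substring of s
theorem foldl_skip_eq_foldl_split (s : String) (ds : List String) :
    ∀ pieces : List String, (∀ p ∈ pieces, p.toList <:+: s.toList) →
      ds.foldl
        (fun pieces d =>
          if PySem.Str.isIn d s then pieces.flatMap (fun p => pySplit p d) else pieces)
        pieces =
      ds.foldl (fun pieces d => pieces.flatMap (fun p => pySplit p d)) pieces := by
  induction ds with
  | nil => intro pieces _; rfl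
  | cons d rest ih =>
    intro pieces hinv
    simp only [List.foldl_cons]
    by_cases hin : PySem.Str.isIn d s = true
    · rw [if_pos hin]
      refine ih (pieces.flatMap (fun p => pySplit p d)) ?_
      intro q hq
      obtain ⟨p, hp, hqp⟩ := List.mem_flatMap.mp hq
      exact (pySplit_infix d p q hqp).trans (hinv p hp)
    · rw [if_neg hin]
      have hid : pieces.flatMap (fun p => pySplit p d) = pieces := by
        rw [List.flatMap_congr (g := fun p => [p])
          (fun p hp => pySplit_no_occ d s p (Bool.eq_false_iff.mpr (by simpa using hin)) (hinv p hp))]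
        simp
      rw [hid]
      exact ih pieces hinv

-- B's per-item pruned fold computes the sequential tokenization of the item
theorem skipFold_eq_seqTokens (ds : List String) (s : String) :
    ds.foldl
      (fun pieces d =>
        if PySem.Str.isIn d s then pieces.flatMap (fun p => pySplit p d) else pieces)
      [s] = seqTokens ds s := by
  rw [foldl_skip_eq_foldl_split s ds [s] (by simp),
    foldl_split_eq_flatMap_seq ds [s]]
  simp

-- erasing one filtered-out element does not change the filter
theorem filter_erase_empty (xs : List String) :
    (xs.erase "").filter (fun t => t ≠ "") = xs.filter (fun t => t ≠ "") := by
  induction xs with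
  | nil => rfl
  | cons x xs ih =>
    by_cases hx : x = ""
    · subst hx; simp
    · rw [List.erase_cons_tail (by simpa using Ne.symm hx)]
      simp only [List.filter_cons, ne_eq, decide_not] at ih ⊢
      simp [hx, ih]

-- the while-remove loop drops exactly the empty strings, keeping order
theorem pyRemoveLoop_eq_filter (xs : List String) :
    pyRemoveLoop xs = xs.filter (fun t => t ≠ "") := by
  unfold pyRemoveLoop
  split
  · next h =>
    rw [pyRemoveLoop_eq_filter (xs.erase ""), filter_erase_empty]
  · next h =>
    symm
    apply List.filter_eq_self.mpr
    intro a ha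
    simp only [ne_eq, decide_eq_true_eq]
    intro he
    exact h (he ▸ ha)
termination_by xs.length
decreasing_by
  have h1 := List.length_erase_of_mem ‹"" ∈ xs›
  have h2 := List.length_pos_of_mem ‹"" ∈ xs›
  omega

-- one whole-list pass of splitting is a flatMap
theorem pass_eq_flatMap (d : String) (xs : List String) :
    xs.foldl (fun outputlist item => outputlist ++ pySplit item d) [] =
      xs.flatMap (fun item => pySplit item d) := by
  simpa using PySem.List.foldl_append_eq_flatMap (g := fun item => pySplit item d) (l := xs) (acc := [])

-- A's sequence of whole-list passes equals the per-item sequential tokenization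
theorem passes_eq_flatMap_tokens (ds : List String) (xs : List String) :
    ds.foldl
      (fun inputlist delimiter =>
        inputlist.foldl (fun outputlist item => outputlist ++ pySplit item delimiter) [])
      xs = xs.flatMap (seqTokens ds) := by
  induction ds generalizing xs with
  | nil => simp [seqTokens]
  | cons d rest ih =>
    simp only [List.foldl_cons]
    rw [pass_eq_flatMap, ih, List.flatMap_assoc]
    rfl

-- ===== VERDICT (by name: the statement is the Claim_ definition above) =====
theorem splitandsanitize_spec : Claim_equal_splitandsanitize := by
  intro inputlist delimiterlist hdom hpre
  clear hdom hpre
  unfold Spec_splitandsanitize splitandsanitize splitandsanitize_alt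
  simp only [List.map_id_fun', id_eq]
  rw [passes_eq_flatMap_tokens, pyRemoveLoop_eq_filter]
  congr 1
  have hbody : ∀ (out : List String) (item : String),
      (delimiterlist.foldl
        (fun pieces d =>
          if PySem.Str.isIn d item then pieces.flatMap (fun p => pySplit p d) else pieces)
        [item]).foldl
        (fun out p =>
          if PySem.Str.strip p ≠ "" then out ++ [PySem.Str.strip p] else out)
        out =
      out ++ ((seqTokens delimiterlist item).map (fun p => PySem.Str.strip p)).filter
        (fun t => t ≠ "") := by
    intro out item
    rw [skipFold_eq_seqTokens,
      PySem.List.foldl_append_ite (p := fun p => PySem.Str.strip p ≠ "")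
        (f := fun p => PySem.Str.strip p), List.filter_map]
    rfl
  calc List.filter (fun t => t ≠ "")
        (List.map (fun item => PySem.Str.strip item) (inputlist.flatMap (seqTokens delimiterlist)))
      = inputlist.flatMap (fun item =>
          ((seqTokens delimiterlist item).map (fun p => PySem.Str.strip p)).filter
            (fun t => t ≠ "")) := by
        induction inputlist with
        | nil => rfl
        | cons x xs ih => simp_all
    _ = inputlist.foldl
          (fun out item =>
            out ++ ((seqTokens delimiterlist item).map (fun p => PySem.Str.strip p)).filter
              (fun t => t ≠ "")) [] := by
        rw [PySem.List.foldl_append_eq_flatMap]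
        rfl
    _ = _ := by
        apply PySem.List.foldl_congr_mem
        intro acc x _
        exact (hbody acc x).symm
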